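-- pv_equiv track=rewrite | github.com/clinikkSpaceofManoj/Renewal-bining-V2 | app.py | GreedyFriendsAlgorithm
-- ===== SOURCE A (Python) =====
-- def GreedyFriendsAlgorithm(amounts, k):
--     amounts = sorted(amounts, reverse=True)
--     totals = [0] * k
--     assignments = [[] for _ in range(k)]
--
--     for amt in amounts:
--         idx = totals.index(min(totals))
--         totals[idx] += amt
--         assignments[idx].append(amt)
--
--     return assignments
-- ===== SOURCE B (Python) =====
-- def GreedyFriendsAlgorithm(amounts, k):
--     # Sorted work-queue of (total, bin_index) pairs: the head is always the
--     # least-loaded bin (lowest index on ties); after assigning, the updated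
--     # pair is re-inserted at its sorted position instead of rescanning all
--     # bins with min()+index() each round.
--     queue = [(0, i) for i in range(k)]
--     assignments = [[] for _ in range(k)]
--     for amt in sorted(amounts, reverse=True):
--         t, i = queue[0]
--         assignments[i].append(amt)
--         queue.pop(0)
--         new = (t + amt, i)
--         j = 0
--         while j < len(queue) and queue[j] < new:
--             j += 1
--         queue.insert(j, new)
--     return assignments
-- ===== Notes on version B (the rewrite author's own statement) =====
-- stated objective: alternative
-- what changed: Replaces A's per-item rescan of all k bin totals (min() followed by list.index()) with a sorted work-queue of (total, bin-index) pairs whose head is always the least-loaded bin; after each assignment the updated pair is re-inserted at its sorted position.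
import Mathlib
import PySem

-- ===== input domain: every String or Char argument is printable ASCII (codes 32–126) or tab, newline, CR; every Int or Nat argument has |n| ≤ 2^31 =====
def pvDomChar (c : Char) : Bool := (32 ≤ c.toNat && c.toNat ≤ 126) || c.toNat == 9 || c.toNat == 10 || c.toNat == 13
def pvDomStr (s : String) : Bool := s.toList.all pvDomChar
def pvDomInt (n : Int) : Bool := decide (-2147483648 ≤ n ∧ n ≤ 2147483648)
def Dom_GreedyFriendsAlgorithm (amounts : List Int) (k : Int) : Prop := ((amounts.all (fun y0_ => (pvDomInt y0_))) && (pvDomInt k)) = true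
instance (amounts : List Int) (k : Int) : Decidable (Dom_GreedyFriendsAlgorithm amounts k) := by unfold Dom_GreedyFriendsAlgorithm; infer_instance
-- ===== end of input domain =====

-- B replaces A's per-item rescan of all bin totals (min + index) by a sorted work-queue
-- of (total, bin) pairs whose head is always the least-loaded bin (alternative decomposition).

-- ===== PORT A =====
-- one loop iteration: idx = totals.index(min(totals)); totals[idx] += amt; assignments[idx].append(amt)
def aStep (st : List Int × List (List Int)) (amt : Int) : List Int × List (List Int) :=
  match PySem.List.min? st.1 (fun x => x) with
  | none => st      -- Python: min([]) raises ValueError; excluded by Pre_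
  | some m =>
    match PySem.List.index? st.1 m with
    | none => st    -- unreachable: m ∈ totals
    | some idx => (st.1.modify idx (· + amt), st.2.modify idx (· ++ [amt]))

def GreedyFriendsAlgorithm (amounts : List Int) (k : Int) : List (List Int) :=
  ((PySem.List.sorted amounts (fun x => x) true).foldl aStep
    (List.replicate k.toNat 0, List.replicate k.toNat [])).2

-- ===== PORT B =====
-- Python tuple comparison (t1, i1) < (t2, i2), lexicographic
def pltb (p q : Int × Nat) : Bool := p.1 < q.1 || (p.1 == q.1 && p.2 < q.2)

-- the while-loop + insert: put `new` before the first queue element not smaller than it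
def bInsert (l : List (Int × Nat)) (new : Int × Nat) : List (Int × Nat) :=
  match l with
  | [] => [new]
  | x :: xs => if pltb x new then x :: bInsert xs new else new :: x :: xs

-- one loop iteration: pop the head (least-loaded bin), append amt, re-insert updated pair
def bStep (st : List (Int × Nat) × List (List Int)) (amt : Int) : List (Int × Nat) × List (List Int) :=
  match st.1 with
  | [] => st      -- Python: queue[0] raises IndexError; excluded by Pre_
  | (t, i) :: rest => (bInsert rest (t + amt, i), st.2.modify i (· ++ [amt]))

def GreedyFriendsAlgorithm_alt (amounts : List Int) (k : Int) : List (List Int) :=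
  ((PySem.List.sorted amounts (fun x => x) true).foldl bStep
    ((List.range k.toNat).map (fun i => ((0 : Int), i)), List.replicate k.toNat [])).2

-- ===== PRECONDITION & SPEC =====
-- Pre_ excludes only inputs where both Pythons raise: k ≤ 0 with a nonempty amounts list
-- (A: ValueError from min([]); B: IndexError from queue[0]).
def Pre_GreedyFriendsAlgorithm (amounts : List Int) (k : Int) : Prop := amounts = [] ∨ 1 ≤ k
instance (amounts : List Int) (k : Int) : Decidable (Pre_GreedyFriendsAlgorithm amounts k) := by unfold Pre_GreedyFriendsAlgorithm; infer_instance

def pvWitness_GreedyFriendsAlgorithm : List Int × Int := ([3, 1, 4, 1, 5], 2)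

def Spec_GreedyFriendsAlgorithm (amounts : List Int) (k : Int) (out : List (List Int)) : Prop := out = GreedyFriendsAlgorithm_alt amounts k
instance (amounts : List Int) (k : Int) (out : List (List Int)) : Decidable (Spec_GreedyFriendsAlgorithm amounts k out) := by unfold Spec_GreedyFriendsAlgorithm; infer_instance

-- ===== CLAIM (what is proved, stated in full; the proofs are below) =====
def Claim_equal_GreedyFriendsAlgorithm : Prop := ∀ (amounts : List Int) (k : Int), Dom_GreedyFriendsAlgorithm amounts k → Pre_GreedyFriendsAlgorithm amounts k → Spec_GreedyFriendsAlgorithm amounts k (GreedyFriendsAlgorithm amounts k)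

-- ===== LEMMAS AND PROOFS =====

lemma pltb_iff (p q : Int × Nat) : pltb p q = true ↔ (p.1 < q.1 ∨ (p.1 = q.1 ∧ p.2 < q.2)) := by
  simp [pltb]

lemma mem_bInsert {l : List (Int × Nat)} {x y : Int × Nat} :
    y ∈ bInsert l x ↔ y = x ∨ y ∈ l := by
  induction l with
  | nil => simp [bInsert]
  | cons a as ih =>
    simp only [bInsert]
    split
    · simp [ih]; tauto
    · simp

lemma perm_bInsert (l : List (Int × Nat)) (x : Int × Nat) :
    (bInsert l x).Perm (x :: l) := by
  induction l with
  | nil => simp [bInsert]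
  | cons a as ih =>
    simp only [bInsert]
    split
    · exact (ih.cons a).trans (List.Perm.swap x a as)
    · exact List.Perm.refl _

lemma pairwise_bInsert {l : List (Int × Nat)} {x : Int × Nat}
    (hl : l.Pairwise (fun a b => pltb a b = true))
    (hne : ∀ y ∈ l, y.2 ≠ x.2) :
    (bInsert l x).Pairwise (fun a b => pltb a b = true) := by
  induction l with
  | nil => simp [bInsert]
  | cons a as ih =>
    rw [List.pairwise_cons] at hl
    simp only [bInsert]
    split
    · rename_i hax
      refine List.pairwise_cons.2 ⟨?_, ih hl.2 (fun y hy => hne y (List.mem_cons_of_mem _ hy))⟩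
      intro y hy
      rcases mem_bInsert.1 hy with h | h
      · exact h ▸ hax
      · exact hl.1 y h
    · rename_i hax
      have hxa : pltb x a = true := by
        have h2 := hne a (List.mem_cons_self)
        have hax' : ¬ (a.1 < x.1 ∨ (a.1 = x.1 ∧ a.2 < x.2)) := by
          rw [← pltb_iff]; simpa using hax
        rw [pltb_iff]
        rcases lt_trichotomy x.1 a.1 with h | h | h
        · exact Or.inl h
        · refine Or.inr ⟨h, ?_⟩
          have hnlt : ¬ a.2 < x.2 := fun hlt => hax' (Or.inr ⟨h.symm, hlt⟩)
          omega
        · exact absurd (Or.inl h) hax'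
      refine List.pairwise_cons.2 ⟨?_, List.pairwise_cons.2 ⟨hl.1, hl.2⟩⟩
      intro y hy
      rcases List.mem_cons.1 hy with rfl | h
      · exact hxa
      · have := hl.1 y h
        rw [pltb_iff] at hxa this ⊢
        omega

-- first-occurrence characterisation of Python's list.index
lemma index?_of_first : ∀ (l : List Int) (n : Nat) (v : Int) (hn : n < l.length),
    l[n] = v → (∀ j (hj : j < l.length), j < n → l[j] ≠ v) →
    PySem.List.index? l v = some n := by
  intro l
  induction l with
  | nil => intro n v hn; simp at hn
  | cons a as ih =>
    intro n v hn hv hfirst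
    cases n with
    | zero =>
      simp only [List.getElem_cons_zero] at hv
      rw [hv]
      exact PySem.List.index?_cons_self v as
    | succ m =>
      have hne : a ≠ v := by
        have := hfirst 0 (by simp) (by omega); simpa using this
      rw [PySem.List.index?_cons_of_ne as hne]
      have := ih m v (by simpa using hn) (by simpa using hv)
        (fun j hj hjm => by
          have := hfirst (j + 1) (by simpa using Nat.succ_lt_succ hj) (by omega)
          simpa using this)
      rw [this]
      rfl

-- elements of zipIdx with position i removed never carry index i
lemma snd_ne_of_mem_eraseIdx {l : List Int} {i : Nat} {y : Int × Nat}
    (hy : y ∈ (l.zipIdx).eraseIdx i) : y.2 ≠ i := by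
  rw [List.eraseIdx_eq_take_drop_succ, List.mem_append] at hy
  rcases hy with h | h
  · rw [List.mem_take_iff_getElem] at h
    obtain ⟨j, hj, hget⟩ := h
    have hjl : j < l.zipIdx.length := lt_of_lt_of_le hj (min_le_right _ _)
    rw [List.getElem_zipIdx] at hget
    have h2 : y.2 = j := by rw [← hget]; simp
    omega
  · rw [List.mem_drop_iff_getElem] at h
    obtain ⟨j, hj, hget⟩ := h
    rw [List.getElem_zipIdx] at hget
    have h2 : y.2 = i + 1 + j := by rw [← hget]; simp
    omega

lemma zipIdx_set (l : List Int) (i : Nat) (v : Int) :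
    (l.set i v).zipIdx = l.zipIdx.set i (v, i) := by
  apply List.ext_getElem
  · simp
  · intro j h1 h2
    rw [List.getElem_zipIdx, List.getElem_set, List.getElem_set]
    split <;> simp_all [List.getElem_zipIdx]

-- the main loop invariant: queue is the lexicographically sorted rearrangement of
-- the (total, bin-index) pairs; then the two folds build the same assignments
lemma loop_eq : ∀ (amts : List Int) (totals : List Int) (queue : List (Int × Nat))
    (asg : List (List Int)),
    totals ≠ [] →
    queue.Perm totals.zipIdx →
    queue.Pairwise (fun a b => pltb a b = true) →
    (amts.foldl aStep (totals, asg)).2 = (amts.foldl bStep (queue, asg)).2 := by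
  intro amts
  induction amts with
  | nil => intro totals queue asg _ _ _; rfl
  | cons amt amts ih =>
    intro totals queue asg hne hperm hpw
    -- queue is nonempty
    have hqlen : queue.length = totals.length := by
      have := hperm.length_eq; simpa using this
    obtain ⟨⟨t, i⟩, rest, rfl⟩ : ∃ p r, queue = p :: r := by
      cases queue with
      | nil => exfalso; apply hne; cases totals with
        | nil => rfl
        | cons a as => simp at hqlen
      | cons p r => exact ⟨p, r, rfl⟩
    have hmemq : (t, i) ∈ totals.zipIdx := hperm.subset List.mem_cons_self
    obtain ⟨-, hilen, hti⟩ := List.mem_zipIdx hmemq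
    have hilen' : i < totals.length := by omega
    have hti' : totals[i] = t := by simpa using hti.symm
    have hhead : ∀ y ∈ rest, pltb (t, i) y = true := (List.pairwise_cons.1 hpw).1
    have hpwrest : rest.Pairwise (fun a b => pltb a b = true) := (List.pairwise_cons.1 hpw).2
    -- rest is a rearrangement of the pairs with position i removed
    have hdecomp : totals.zipIdx.Perm ((t, i) :: totals.zipIdx.eraseIdx i) := by
      have h1 : totals.zipIdx = totals.zipIdx.take i ++ (t, i) :: totals.zipIdx.drop (i + 1) := by
        conv_lhs => rw [← List.take_append_drop i totals.zipIdx]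
        congr 1
        rw [← List.getElem_cons_drop (by simpa using hilen')]
        congr 1
        rw [List.getElem_zipIdx]; simp [hti']
      rw [List.eraseIdx_eq_take_drop_succ]
      conv_lhs => rw [h1]
      exact List.perm_middle
    have hrest : rest.Perm (totals.zipIdx.eraseIdx i) :=
      ((hperm.trans hdecomp)).cons_inv
    -- t is min(totals)
    have hmin : PySem.List.min? totals (fun x => x) = some t := by
      rcases hm : PySem.List.min? totals (fun x => x) with - | m
      · exact absurd ((PySem.List.min?_eq_none_iff totals (fun x => x)).1 hm) hne
      · have hmmem : m ∈ totals := PySem.List.min?_mem hm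
        have hmle : ∀ y ∈ totals, m ≤ y := fun y hy => PySem.List.min?_isMin hm y hy
        obtain ⟨j, hj, hjm⟩ := List.mem_iff_getElem.1 hmmem
        have hpair : (m, j) ∈ totals.zipIdx := by
          have : totals.zipIdx[j]'(by simpa using hj) = (m, j) := by
            rw [List.getElem_zipIdx]; simp [hjm]
          exact this ▸ List.getElem_mem _
        have hq : (m, j) ∈ (t, i) :: rest := hperm.mem_iff.2 hpair
        have htm : t = m := by
          have hmt : m ≤ t := hmle t (hti' ▸ List.getElem_mem hilen')
          rcases List.mem_cons.1 hq with h | h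
          · exact (congrArg Prod.fst h).symm
          · have := hhead _ h
            rw [pltb_iff] at this
            simp only at this
            omega
        rw [htm]
    -- i is totals.index(t)
    have hidx : PySem.List.index? totals t = some i := by
      apply index?_of_first totals i t hilen' hti'
      intro j hj hji hjt
      have hpair : (t, j) ∈ totals.zipIdx := by
        have : totals.zipIdx[j]'(by simpa using hj) = (t, j) := by
          rw [List.getElem_zipIdx]; simp [hjt]
        exact this ▸ List.getElem_mem _
      have hq : (t, j) ∈ (t, i) :: rest := hperm.mem_iff.2 hpair
      rcases List.mem_cons.1 hq with h | h
      · have : j = i := congrArg Prod.snd h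
        omega
      · have := hhead _ h
        rw [pltb_iff] at this
        simp at this
        omega
    -- reduce one step of each fold
    have hstepA : aStep (totals, asg) amt =
        (totals.modify i (· + amt), asg.modify i (· ++ [amt])) := by
      have hidx' : List.idxOf? t totals = some i := by
        rw [← PySem.List.index?_eq_idxOf?]; exact hidx
      simp [aStep, hmin, hidx']
    have hstepB : bStep ((t, i) :: rest, asg) amt =
        (bInsert rest (t + amt, i), asg.modify i (· ++ [amt])) := by
      simp [bStep]
    rw [List.foldl_cons, List.foldl_cons, hstepA, hstepB]
    -- re-establish the invariant
    have hmodset : totals.modify i (· + amt) = totals.set i (t + amt) := by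
      rw [List.modify_eq_set]
      congr 1
      simp [List.getElem?_eq_getElem hilen', hti']
    apply ih
    · intro h
      have hlen := congrArg List.length h
      simp only [List.length_modify, List.length_nil] at hlen
      exact hne (List.eq_nil_of_length_eq_zero hlen)
    · rw [hmodset, zipIdx_set]
      have hset : (totals.zipIdx.set i (t + amt, i)).Perm
          ((t + amt, i) :: totals.zipIdx.eraseIdx i) := by
        rw [List.set_eq_take_append_cons_drop, List.eraseIdx_eq_take_drop_succ]
        rw [if_pos (by simpa using hilen')]
        exact List.perm_middle
      exact ((perm_bInsert _ _).trans ((hrest.cons _))).trans hset.symm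
    · apply pairwise_bInsert hpwrest
      intro y hy
      exact snd_ne_of_mem_eraseIdx (hrest.subset hy)

lemma zipIdx_replicate (n : Nat) :
    (List.replicate n (0 : Int)).zipIdx = (List.range n).map (fun i => ((0 : Int), i)) := by
  apply List.ext_getElem
  · simp
  · intro j h1 h2
    rw [List.getElem_zipIdx]
    simp

-- ===== VERDICT (by name: the statement is the Claim_ definition above) =====
theorem GreedyFriendsAlgorithm_spec : Claim_equal_GreedyFriendsAlgorithm := by
  intro amounts k _ hpre
  unfold Spec_GreedyFriendsAlgorithm GreedyFriendsAlgorithm GreedyFriendsAlgorithm_alt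
  rcases hpre with rfl | hk
  · rfl
  · have hn : 0 < k.toNat := by omega
    apply loop_eq
    · intro h
      have hlen := congrArg List.length h
      simp at hlen
      omega
    · rw [zipIdx_replicate]
    · rw [List.pairwise_map]
      apply List.Pairwise.imp _ List.pairwise_lt_range
      intro a b hab
      simp [pltb, hab]
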